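-- pv_equiv track=rewrite | github.com/arsenmanukjan/TITpv20Funktioonid | TITpv20Funktioonid.py | minimum
-- ===== SOURCE A (Python) =====
-- def minimum(palk,inimesed):      #Если несколько человек с минимальной зарплатой, так что лучше добавить список
--     m_palgad=[]
--     nimed=[]
--     min_palk=palk[0]
--     kellel=inimesed[0]
--     for p in palk:       # перебираем всю запрлату
--         if p<min_palk:
--             min_palk=p          # если нашли что-то меньше, чем минимальная зарплата, мы ее приравниваем к минимуму
--             i=palk.index(min_palk)  # через метод индекс, узнаем на каком месте находится мин.зарплата
--             kellel=inimesed[i]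
--     n=palk.count(min_palk)
--     palk_copy=palk.copy()
--     inimesed_copy=inimesed.copy()  # копирует список, делает копию
--     for i in range(n):
--         j=palk_copy.index(min_palk)
--         m_palgad.append(palk_copy.pop(j))
--         nimed.append(inimesed_copy.pop(j))
--     return m_palgad, nimed  # вернула значение и сказала у кого оно  / кто получает самую маленькую зарплату и какую именно
-- ===== SOURCE B (Python) =====
-- def minimum(palk, inimesed):
--     m = min(palk)
--     return [p for p in palk if p == m], [nimi for p, nimi in zip(palk, inimesed) if p == m]
-- ===== Notes on version B (the rewrite author's own statement) =====
-- stated objective: faster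
-- what changed: Replaces A's running-min-with-index-lookup loop plus count/copy/repeated index+pop loop (each a linear scan) by a single min() call and two comprehensions over the zipped lists.
-- outside the precondition, e.g. on minimum([], []): A raises IndexError, B raises ValueError; on minimum([2, 1], ['a']): A raises IndexError, B returns ([1], [])
import Mathlib
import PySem

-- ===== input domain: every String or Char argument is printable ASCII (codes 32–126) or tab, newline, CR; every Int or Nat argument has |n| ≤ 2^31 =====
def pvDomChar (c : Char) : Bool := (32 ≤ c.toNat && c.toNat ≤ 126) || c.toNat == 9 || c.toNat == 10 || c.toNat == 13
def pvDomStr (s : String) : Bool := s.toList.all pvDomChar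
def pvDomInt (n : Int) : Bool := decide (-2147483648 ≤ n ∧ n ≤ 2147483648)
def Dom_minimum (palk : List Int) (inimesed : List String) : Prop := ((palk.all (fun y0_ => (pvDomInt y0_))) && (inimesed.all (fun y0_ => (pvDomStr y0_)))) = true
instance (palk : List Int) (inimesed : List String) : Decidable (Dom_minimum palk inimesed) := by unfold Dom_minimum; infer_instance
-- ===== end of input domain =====

-- B replaces A's quadratic running-min/count/index+pop machinery by one min() and two
-- comprehensions over the zipped lists (objective: faster, O(n^2) -> O(n)).

-- ===== PORT A =====
-- step of A's first loop: running minimum, with palk.index / inimesed[i] lookups (none = raise)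
def aStep (palk : List Int) (inimesed : List String) (st : Option (Int × String)) (p : Int) :
    Option (Int × String) :=
  match st with
  | none => none
  | some (minP, kellel) =>
    if p < minP then
      match PySem.List.index? palk p with
      | some i =>
        match PySem.List.pyGet? inimesed (i : Int) with
        | some k => some (p, k)
        | none => none
      | none => none
    else some (minP, kellel)

-- body of A's second loop: j = index of min, pop it from both copies, append to outputs
def aPop (minP : Int) (st : Option (List Int × List String × List Int × List String)) :
    Option (List Int × List String × List Int × List String) :=
  match st with
  | none => none
  | some (pc, ic, mp, nm) =>
    match PySem.List.index? pc minP with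
    | none => none
    | some j =>
      match PySem.List.pop? pc (j : Int), PySem.List.pop? ic (j : Int) with
      | some (v, pc'), some (w, ic') => some (pc', ic', mp ++ [v], nm ++ [w])
      | _, _ => none

def minimum (palk : List Int) (inimesed : List String) : List Int × List String :=
  match PySem.List.pyGet? palk 0, PySem.List.pyGet? inimesed 0 with
  | some p0, some k0 =>
    match palk.foldl (aStep palk inimesed) (some (p0, k0)) with
    | none => ([], [])
    | some (minP, _) =>
      let n := PySem.List.count palk minP
      match (PySem.List.pyRange 0 (n : Int) 1).foldl (fun st _ => aPop minP st)
          (some (palk, inimesed, ([] : List Int), ([] : List String))) with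
      | none => ([], [])
      | some (_, _, mp, nm) => (mp, nm)
  | _, _ => ([], [])

-- ===== PORT B =====
def minimum_alt (palk : List Int) (inimesed : List String) : List Int × List String :=
  match PySem.List.min? palk (fun x => x) with
  | none => ([], [])  -- min([]) raises ValueError; excluded by Pre_
  | some m =>
    (palk.filter (fun p => p == m),
     (palk.zip inimesed).filterMap (fun q => if q.1 = m then some q.2 else none))

-- ===== PRECONDITION & SPEC =====
-- Pre_ excludes exactly the inputs where A raises: empty palk (IndexError on palk[0]),
-- and inputs where the minimum salary occurs at a position ≥ len(inimesed)
-- (IndexError on inimesed[i] / inimesed_copy.pop(j)).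
def Pre_minimum (palk : List Int) (inimesed : List String) : Prop :=
  palk ≠ [] ∧ palk.tail.foldl min (palk.headD 0) ∉ palk.drop inimesed.length
instance (palk : List Int) (inimesed : List String) : Decidable (Pre_minimum palk inimesed) := by
  unfold Pre_minimum; infer_instance

def pvWitness_minimum : List Int × List String := ([3, 1, 2, 1], ["a", "b", "c", "d"])

def Spec_minimum (palk : List Int) (inimesed : List String) (out : List Int × List String) : Prop := out = minimum_alt palk inimesed
instance (palk : List Int) (inimesed : List String) (out : List Int × List String) : Decidable (Spec_minimum palk inimesed out) := by unfold Spec_minimum; infer_instance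

-- ===== CLAIM (what is proved, stated in full; the proofs are below) =====
def Claim_equal_minimum : Prop := ∀ (palk : List Int) (inimesed : List String), Dom_minimum palk inimesed → Pre_minimum palk inimesed → Spec_minimum palk inimesed (minimum palk inimesed)

-- ===== LEMMAS AND PROOFS =====

-- the names B selects, as a function (definitionally B's second component)
def zsel (m : Int) (pc : List Int) (ic : List String) : List String :=
  (pc.zip ic).filterMap (fun q => if q.1 = m then some q.2 else none)

lemma zsel_of_not_mem (m : Int) (pc : List Int) (ic : List String) (h : m ∉ pc) :
    zsel m pc ic = [] := by
  unfold zsel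
  rw [List.filterMap_eq_nil_iff]
  intro q hq
  have : q.1 ∈ pc := (List.of_mem_zip hq).1
  simp only [ite_eq_right_iff]
  intro he
  exact absurd (he ▸ this) h

-- A's first loop computes the running minimum (and never raises) as long as every element
-- that is strictly below the running minimum has a safe index.
lemma loop1_spec (palk : List Int) (inimesed : List String) :
    ∀ (l : List Int) (c : Int) (k : String),
    (∀ l1 x l2, l = l1 ++ x :: l2 → x < l1.foldl min c →
      ∃ i s, PySem.List.index? palk x = some i ∧ PySem.List.pyGet? inimesed (i : Int) = some s) →
    ∃ k', l.foldl (aStep palk inimesed) (some (c, k)) = some (l.foldl min c, k') := by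
  intro l
  induction l with
  | nil => intro c k _; exact ⟨k, rfl⟩
  | cons p l' ih =>
    intro c k H
    by_cases hp : p < c
    · obtain ⟨i, s, hi, hs⟩ := H [] p l' rfl (by simpa using hp)
      have hi' : List.idxOf? p palk = some i := by simpa using hi
      have hs' : inimesed[i]? = some s := by simpa using hs
      have hstep : aStep palk inimesed (some (c, k)) p = some (p, s) := by
        simp [aStep, hp, hi', hs']
      have hmin : min c p = p := min_eq_right (le_of_lt hp)
      obtain ⟨k', hk'⟩ := ih p s (by
        intro l1 x l2 hdec hx
        refine H (p :: l1) x l2 (by rw [hdec]; rfl) ?_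
        simpa [List.foldl_cons, hmin] using hx)
      exact ⟨k', by simp [List.foldl_cons, hstep, hmin, hk']⟩
    · have hstep : aStep palk inimesed (some (c, k)) p = some (c, k) := by
        simp [aStep, hp]
      have hmin : min c p = c := min_eq_left (le_of_not_gt hp)
      obtain ⟨k', hk'⟩ := ih c k (by
        intro l1 x l2 hdec hx
        refine H (p :: l1) x l2 (by rw [hdec]; rfl) ?_
        simpa [List.foldl_cons, hmin] using hx)
      exact ⟨k', by simp [List.foldl_cons, hstep, hmin, hk']⟩

-- popping the first occurrence of m from both paired lists peels one name off zsel
lemma zsel_pop (m : Int) :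
    ∀ (pc : List Int) (ic : List String) (j : Nat),
    PySem.List.index? pc m = some j → j < ic.length →
    ∃ s pc' ic',
      PySem.List.pop? pc (j : Int) = some (m, pc') ∧
      PySem.List.pop? ic (j : Int) = some (s, ic') ∧
      zsel m pc ic = s :: zsel m pc' ic' ∧
      pc'.count m + 1 = pc.count m ∧
      (m ∉ pc.drop ic.length → m ∉ pc'.drop ic'.length) := by
  intro pc
  induction pc with
  | nil => intro ic j h; rw [PySem.List.index?_eq_idxOf?] at h; simp at h
  | cons p pc₂ ih =>
    intro ic j hidx hj
    by_cases hpm : p = m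
    · subst hpm
      rw [PySem.List.index?_cons_self] at hidx
      obtain rfl : j = 0 := by simpa using hidx.symm
      obtain ⟨s, ic₂, rfl⟩ : ∃ s ic₂, ic = s :: ic₂ := by
        cases ic with
        | nil => simp at hj
        | cons s t => exact ⟨s, t, rfl⟩
      refine ⟨s, pc₂, ic₂, ?_, ?_, ?_, ?_, ?_⟩
      · exact PySem.List.pop?_zero_cons p pc₂
      · exact PySem.List.pop?_zero_cons s ic₂
      · simp [zsel]
      · simp
      · intro hsafe; simpa using hsafe
    · rw [PySem.List.index?_cons_of_ne pc₂ hpm] at hidx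
      obtain ⟨j₂, hidx₂, rfl⟩ : ∃ j₂, PySem.List.index? pc₂ m = some j₂ ∧ j = j₂ + 1 := by
        cases h : PySem.List.index? pc₂ m with
        | none => rw [h] at hidx; simp at hidx
        | some j₂ => rw [h] at hidx; exact ⟨j₂, rfl, by simpa using hidx.symm⟩
      obtain ⟨s₀, ic₂, rfl⟩ : ∃ s₀ ic₂, ic = s₀ :: ic₂ := by
        cases ic with
        | nil => simp at hj
        | cons s t => exact ⟨s, t, rfl⟩
      have hj₂ : j₂ < ic₂.length := by simpa using hj
      obtain ⟨s, pc', ic', hpop1, hpop2, hz, hc, hs⟩ := ih ic₂ j₂ hidx₂ hj₂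
      obtain ⟨hk2, -, -⟩ := PySem.List.getElem_of_index?_eq_some hidx₂
      have e1 := PySem.List.pop?_natCast pc₂ j₂ hk2
      rw [hpop1] at e1
      have e1' : m = pc₂[j₂] ∧ pc' = pc₂.eraseIdx j₂ := by
        have := e1.symm
        simp only [Option.some.injEq, Prod.mk.injEq] at this
        exact ⟨this.1.symm, this.2.symm⟩
      have e2 := PySem.List.pop?_natCast ic₂ j₂ hj₂
      rw [hpop2] at e2
      have e2' : s = ic₂[j₂] ∧ ic' = ic₂.eraseIdx j₂ := by
        have := e2.symm
        simp only [Option.some.injEq, Prod.mk.injEq] at this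
        exact ⟨this.1.symm, this.2.symm⟩
      refine ⟨s, p :: pc', s₀ :: ic', ?_, ?_, ?_, ?_, ?_⟩
      · have hlt : j₂ + 1 < (p :: pc₂).length := by simp; omega
        have := PySem.List.pop?_natCast (p :: pc₂) (j₂ + 1) hlt
        rw [this]
        simp [List.getElem_cons_succ, List.eraseIdx_cons_succ, ← e1'.1, e1'.2]
      · have hlt : j₂ + 1 < (s₀ :: ic₂).length := by simp; omega
        have := PySem.List.pop?_natCast (s₀ :: ic₂) (j₂ + 1) hlt
        rw [this]
        simp [List.getElem_cons_succ, List.eraseIdx_cons_succ, ← e2'.1, e2'.2]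
      · simp [zsel, hpm] at hz ⊢; exact hz
      · simpa [List.count_cons, hpm] using hc
      · intro hsafe
        simp only [List.length_cons, List.drop_succ_cons] at hsafe ⊢
        exact hs hsafe

-- iterate aPop n times (A's second loop with its unused range index stripped)
def iterPop (m : Int) : Nat → Option (List Int × List String × List Int × List String) →
    Option (List Int × List String × List Int × List String)
  | 0, st => st
  | n + 1, st => iterPop m n (aPop m st)

lemma foldl_aPop_eq_iterPop (m : Int) :
    ∀ (l : List Int) (st : Option (List Int × List String × List Int × List String)),
    l.foldl (fun st _ => aPop m st) st = iterPop m l.length st := by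
  intro l
  induction l with
  | nil => intro st; rfl
  | cons x t ih => intro st; simp [List.foldl_cons, List.length_cons, iterPop, ih]

-- (real second-loop lemma)
lemma loop2_run (m : Int) :
    ∀ (n : Nat) (pc : List Int) (ic : List String) (mp : List Int) (nm : List String),
    pc.count m = n → m ∉ pc.drop ic.length →
    ∃ pcf icf, iterPop m n (some (pc, ic, mp, nm)) =
      some (pcf, icf, mp ++ List.replicate n m, nm ++ zsel m pc ic) := by
  intro n
  induction n with
  | zero =>
    intro pc ic mp nm hcount _
    have hnot : m ∉ pc := by simpa using (List.count_eq_zero).1 hcount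
    exact ⟨pc, ic, by simp [iterPop, zsel_of_not_mem m pc ic hnot]⟩
  | succ n ih =>
    intro pc ic mp nm hcount hsafe
    have hmem : m ∈ pc := by
      by_contra h
      rw [List.count_eq_zero.2 h] at hcount
      omega
    obtain ⟨j, hidx⟩ : ∃ j, PySem.List.index? pc m = some j := by
      cases h : PySem.List.index? pc m with
      | none => exact absurd hmem ((PySem.List.index?_eq_none_iff _ _).1 h)
      | some j => exact ⟨j, rfl⟩
    have hjlen : j < ic.length := by
      by_contra hge
      obtain ⟨hk, hget, _⟩ := PySem.List.getElem_of_index?_eq_some hidx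
      have : m ∈ pc.drop ic.length := by
        have h1 : ic.length ≤ j := by omega
        have : pc.drop ic.length ≠ [] → True := fun _ => trivial
        have hjd : j - ic.length < (pc.drop ic.length).length := by
          rw [List.length_drop]; omega
        have : (pc.drop ic.length)[j - ic.length] = pc[j] := by
          rw [List.getElem_drop]; congr 1; omega
        rw [← hget, ← this]
        exact List.getElem_mem hjd
      exact hsafe this
    obtain ⟨s, pc', ic', hpop1, hpop2, hz, hc, hs⟩ := zsel_pop m pc ic j hidx hjlen
    have hidx' : List.idxOf? m pc = some j := by simpa using hidx
    have hstep : aPop m (some (pc, ic, mp, nm)) = some (pc', ic', mp ++ [m], nm ++ [s]) := by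
      simp [aPop, hidx', hpop1, hpop2]
    obtain ⟨pcf, icf, hrest⟩ := ih pc' ic' (mp ++ [m]) (nm ++ [s]) (by omega) (hs hsafe)
    refine ⟨pcf, icf, ?_⟩
    show iterPop m n (aPop m (some (pc, ic, mp, nm))) = _
    rw [hstep, hrest, hz]
    simp [List.replicate_succ]

-- the filtered salaries are n copies of the minimum
lemma filter_eq_replicate_count (m : Int) (l : List Int) :
    l.filter (fun p => p == m) = List.replicate (l.count m) m := by
  induction l with
  | nil => rfl
  | cons x t ih =>
    by_cases hx : x = m
    · subst hx; simp [List.replicate_succ, ih]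
    · simp [hx, ih]

-- ===== VERDICT (by name: the statement is the Claim_ definition above) =====
theorem minimum_spec : Claim_equal_minimum := by
  intro palk inimesed _ hpre
  obtain ⟨hne, hsafe⟩ := hpre
  obtain ⟨h, t, rfl⟩ : ∃ h t, palk = h :: t := by
    cases palk with
    | nil => exact absurd rfl hne
    | cons h t => exact ⟨h, t, rfl⟩
  set m := t.foldl min h with hm
  have hsafe' : m ∉ (h :: t).drop inimesed.length := by simpa [hm] using hsafe
  -- the minimum is ≤ every element
  have hmin_le : ∀ y ∈ h :: t, m ≤ y := by
    intro y hy
    rcases List.mem_cons.1 hy with rfl | hy'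
    · exact (PySem.List.foldl_min_le t y).1
    · exact (PySem.List.foldl_min_le t h).2 y hy'
  -- inimesed is nonempty (the minimum occurs somewhere, at an index < inimesed.length)
  have hm_mem : m ∈ h :: t := by
    rcases PySem.List.foldl_min_mem t h with he | he
    · rw [hm, he]; exact List.mem_cons_self
    · exact List.mem_cons_of_mem h (hm ▸ he)
  have hic_ne : inimesed ≠ [] := by
    intro hnil
    rw [hnil] at hsafe'
    exact hsafe' (by simpa using hm_mem)
  obtain ⟨k0, ic_t, rfl⟩ : ∃ k0 ic_t, inimesed = k0 :: ic_t := by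
    cases inimesed with
    | nil => exact absurd rfl hic_ne
    | cons a b => exact ⟨a, b, rfl⟩
  -- safety condition for the first loop
  have hsafety : ∀ l1 x l2, (h :: t) = l1 ++ x :: l2 → x < l1.foldl min h →
      ∃ i s, PySem.List.index? (h :: t) x = some i ∧
        PySem.List.pyGet? (k0 :: ic_t) (i : Int) = some s := by
    intro l1 x l2 hdec hx
    have hx_mem : x ∈ h :: t := by rw [hdec]; exact List.mem_append_right l1 List.mem_cons_self
    obtain ⟨i, hidx⟩ : ∃ i, PySem.List.index? (h :: t) x = some i := by
      cases hh : PySem.List.index? (h :: t) x with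
      | none => exact absurd hx_mem ((PySem.List.index?_eq_none_iff _ _).1 hh)
      | some i => exact ⟨i, rfl⟩
    -- m is in x :: l2 (it cannot be in l1, every element there is > x ≥ m … )
    have hm_suffix : m ∈ x :: l2 := by
      rcases List.mem_append.1 (hdec ▸ hm_mem) with hin | hin
      · exfalso
        have h1 : l1.foldl min h ≤ m := (PySem.List.foldl_min_le l1 h).2 m hin
        have h2 : m ≤ x := hmin_le x hx_mem
        omega
      · exact hin
    -- hence l1.length < (k0 :: ic_t).length
    have hl1 : l1.length < (k0 :: ic_t).length := by
      by_contra hge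
      apply hsafe'
      have : m ∈ (h :: t).drop l1.length := by
        rw [hdec, List.drop_left]; exact hm_suffix
      have hdd : (h :: t).drop l1.length =
          ((h :: t).drop (k0 :: ic_t).length).drop (l1.length - (k0 :: ic_t).length) := by
        rw [List.drop_drop]; congr 1; omega
      rw [hdd] at this
      exact List.mem_of_mem_drop this
    -- the first index of x is ≤ l1.length
    have hile : i ≤ l1.length := by
      obtain ⟨hk, hget, hfirst⟩ := PySem.List.getElem_of_index?_eq_some hidx
      by_contra hgt
      have hl1lt : l1.length < (h :: t).length := by
        rw [hdec]; simp
      have hx_at : (h :: t)[l1.length]'hl1lt = x := by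
        simp only [hdec]
        rw [List.getElem_append_right (le_refl l1.length)]
        simp
      exact hfirst l1.length (by omega) hx_at
    have hi_lt : i < (k0 :: ic_t).length := by omega
    refine ⟨i, (k0 :: ic_t)[i], hidx, ?_⟩
    rw [PySem.List.pyGet?_natCast]
    exact List.getElem?_eq_getElem hi_lt
  -- run the first loop
  obtain ⟨k', hloop1⟩ := loop1_spec (h :: t) (k0 :: ic_t) (h :: t) h k0 hsafety
  have hfold_min : (h :: t).foldl min h = m := by simp [List.foldl_cons, hm]
  -- run the second loop
  obtain ⟨pcf, icf, hloop2⟩ :=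
    loop2_run m ((h :: t).count m) (h :: t) (k0 :: ic_t) [] [] rfl hsafe'
  -- assemble
  show minimum _ _ = minimum_alt _ _
  unfold minimum minimum_alt
  rw [PySem.List.min?_id_cons]
  simp only [PySem.List.pyGet?_zero_cons]
  rw [hfold_min] at hloop1
  rw [hloop1]
  simp only [PySem.List.count_eq]
  rw [foldl_aPop_eq_iterPop]
  have hlen : (PySem.List.pyRange 0 (((h :: t).count m : Nat) : Int) 1).length = (h :: t).count m := by
    rw [PySem.List.pyRange_zero_natCast]; simp
  rw [hlen, hloop2]
  rw [filter_eq_replicate_count m (h :: t)]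
  rfl
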